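-- pv_equiv track=rewrite | github.com/ShajeshJ/peanuts-bot | peanuts_bot/libraries/itertools_ext.py | at_least_n
-- ===== SOURCE A (Python) =====
-- from collections.abc import Iterable
--
-- def at_least_n(__iterable: Iterable, /, n: int=1) -> bool:
--     """Return True if bool(x) is True for at least n items"""
--
--     if n < 1:
--         raise ValueError(f"n must be >= 1")
--
--     iterator = iter(__iterable)
--
--     # `any` will consume the iterator up to the first truthy item and pauses.
--     # So calling `any` n times will consume up to the first n truthy items.
--     for _ in range(n):
--         if not any(iterator):
--             return False
--
--     return True
-- ===== SOURCE B (Python) =====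
-- from collections.abc import Iterable
--
-- def at_least_n(__iterable: Iterable, /, n: int = 1) -> bool:
--     """Return True if bool(x) is True for at least n items"""
--     if n < 1:
--         raise ValueError(f"n must be >= 1")
--     return sum(map(bool, __iterable)) >= n
-- ===== Notes on version B (the rewrite author's own statement) =====
-- stated objective: simpler
-- what changed: Replaces the n-fold repeated any() short-circuit scan with an exhaustive aggregate: count all truthy items with sum(map(bool, ...)) and compare the total against n (no early exit).
import Mathlib
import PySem

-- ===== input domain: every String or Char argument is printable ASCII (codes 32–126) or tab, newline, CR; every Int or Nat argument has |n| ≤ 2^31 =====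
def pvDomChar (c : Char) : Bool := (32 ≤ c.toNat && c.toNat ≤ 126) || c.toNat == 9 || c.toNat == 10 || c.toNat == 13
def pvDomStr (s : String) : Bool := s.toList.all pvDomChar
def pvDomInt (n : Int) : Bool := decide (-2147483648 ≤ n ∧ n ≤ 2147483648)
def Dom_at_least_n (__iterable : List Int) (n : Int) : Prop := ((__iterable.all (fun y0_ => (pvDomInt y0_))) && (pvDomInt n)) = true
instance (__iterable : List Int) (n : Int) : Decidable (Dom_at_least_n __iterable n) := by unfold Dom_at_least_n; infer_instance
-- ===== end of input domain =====

-- B replaces A's repeated-any() early-exit scan with an exhaustive count of all truthy items followed by one comparison against n (simpler); equivalent on n >= 1 (A raises ValueError otherwise).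
-- ===== PORT A =====
-- `any(iterator)` consumes the iterator up to and including the first truthy item:
-- returns the suffix after the first nonzero element, or none if no nonzero element remains.
def anyConsume (xs : List Int) : Option (List Int) :=
  match xs with
  | [] => none
  | x :: rest => if x != 0 then some rest else anyConsume rest

-- the `for _ in range(n)` loop: k remaining iterations over the iterator state xs
def atLeastLoop (k : Nat) (xs : List Int) : Bool :=
  match k with
  | 0 => true
  | k + 1 =>
    match anyConsume xs with
    | none => false
    | some rest => atLeastLoop k rest

def at_least_n (__iterable : List Int) (n : Int) : Bool :=
  atLeastLoop n.toNat __iterable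

-- ===== PORT B =====
-- sum(map(bool, __iterable)): fold over the whole list adding bool(x) as 0/1
def truthySum (xs : List Int) : Int :=
  xs.foldl (fun acc x => acc + (if x != 0 then 1 else 0)) 0

def at_least_n_alt (__iterable : List Int) (n : Int) : Bool :=
  decide (n ≤ truthySum __iterable)

-- ===== PRECONDITION & SPEC =====
-- A raises ValueError when n < 1; both implementations keep that guard, so Pre_ requires 1 <= n.
def Pre_at_least_n (__iterable : List Int) (n : Int) : Prop := 1 ≤ n
instance (__iterable : List Int) (n : Int) : Decidable (Pre_at_least_n __iterable n) := by unfold Pre_at_least_n; infer_instance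
def pvWitness_at_least_n : List Int × Int := ([0, 3, 2], 2)
def Spec_at_least_n (__iterable : List Int) (n : Int) (out : Bool) : Prop := out = at_least_n_alt __iterable n
instance (__iterable : List Int) (n : Int) (out : Bool) : Decidable (Spec_at_least_n __iterable n out) := by unfold Spec_at_least_n; infer_instance

-- ===== CLAIM (what is proved, stated in full; the proofs are below) =====
def Claim_equal_at_least_n : Prop := ∀ (__iterable : List Int) (n : Int), Dom_at_least_n __iterable n → Pre_at_least_n __iterable n → Spec_at_least_n __iterable n (at_least_n __iterable n)

-- ===== LEMMAS AND PROOFS =====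
lemma truthySum_shift (xs : List Int) : ∀ (a : Int),
    xs.foldl (fun acc x => acc + (if x != 0 then 1 else 0)) a
      = a + xs.foldl (fun acc x => acc + (if x != 0 then 1 else 0)) 0 := by
  induction xs with
  | nil => intro a; simp
  | cons x rest ih =>
    intro a
    simp only [List.foldl_cons]
    rw [ih (a + _), ih (0 + _)]
    ring

lemma truthySum_cons (x : Int) (rest : List Int) :
    truthySum (x :: rest) = (if x != 0 then 1 else 0) + truthySum rest := by
  unfold truthySum
  simp only [List.foldl_cons]
  rw [truthySum_shift]
  ring

lemma truthySum_nonneg (xs : List Int) : 0 ≤ truthySum xs := by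
  induction xs with
  | nil => simp [truthySum]
  | cons x rest ih =>
    rw [truthySum_cons]
    split <;> omega

lemma loop_eq_sum : ∀ (xs : List Int) (k : Nat),
    atLeastLoop k xs = decide ((k : Int) ≤ truthySum xs) := by
  intro xs
  induction xs with
  | nil =>
    intro k
    cases k with
    | zero => simp [atLeastLoop, truthySum]
    | succ m =>
      simp [atLeastLoop, anyConsume, truthySum]
  | cons x rest ih =>
    intro k
    by_cases hx : x = 0
    · have hsum : truthySum (x :: rest) = truthySum rest := by
        rw [truthySum_cons]; simp [hx]
      cases k with
      | zero =>
        simp [atLeastLoop, hsum]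
        exact truthySum_nonneg rest
      | succ m =>
        have : atLeastLoop (m + 1) (x :: rest) = atLeastLoop (m + 1) rest := by
          simp [atLeastLoop, anyConsume, hx]
        rw [this, ih (m + 1), hsum]
    · have hsum : truthySum (x :: rest) = 1 + truthySum rest := by
        rw [truthySum_cons]; simp [hx]
      cases k with
      | zero =>
        have := truthySum_nonneg rest
        simp [atLeastLoop]
        omega
      | succ m =>
        have hstep : atLeastLoop (m + 1) (x :: rest) = atLeastLoop m rest := by
          simp [atLeastLoop, anyConsume, hx]
        rw [hstep, ih m, hsum]
        congr 1
        simp only [eq_iff_iff]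
        push_cast
        omega

-- ===== VERDICT (by name: the statement is the Claim_ definition above) =====
theorem at_least_n_spec : Claim_equal_at_least_n := by
  intro xs n _ hpre
  unfold Spec_at_least_n at_least_n at_least_n_alt
  rw [loop_eq_sum xs n.toNat]
  congr 1
  simp only [eq_iff_iff]
  have hn : 1 ≤ n := hpre
  omega
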